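-- pv_equiv track=rewrite | github.com/Tombarr/ai-microgames | games/box_pusher/generate_assets_png.py | parse_sprite
-- ===== SOURCE A (Python) =====
-- PALETTE = {
--     ' ': (0, 0, 0, 0),       # Transparent
--     '.': (30, 30, 30, 255),  # Floor bg (Very Dark Grey)
--     'G': (60, 60, 60, 255),  # Metal Grey
--     'D': (40, 40, 40, 255),  # Darker Metal
--     'K': (10, 10, 10, 255),  # Black/Outline
--     'Y': (255, 200, 0, 255), # Industrial Yellow
--     'N': (57, 255, 20, 255), # Neon Green
--     'W': (220, 220, 220, 255)# White/Highlight
-- }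
--
-- def parse_sprite(ascii_art, scale=4):
--     lines = [l.replace(' ', '') for l in ascii_art.strip().split('\n') if l]
--     h = len(lines)
--     w = len(lines[0])
--
--     pixels = []
--     # Create original grid
--     grid = []
--     for line in lines:
--         row = []
--         for char in line:
--             row.append(PALETTE.get(char, (255, 0, 255, 255))) # Magenta for error
--         grid.append(row)
--
--     # Scale up
--     scaled_pixels = []
--     for y in range(h * scale):
--         for x in range(w * scale):
--             orig_x = x // scale
--             orig_y = y // scale
--             scaled_pixels.append(grid[orig_y][orig_x])
--
--     return w * scale, h * scale, scaled_pixels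
-- ===== SOURCE B (Python) =====
-- PALETTE = {
--     ' ': (0, 0, 0, 0),       # Transparent
--     '.': (30, 30, 30, 255),  # Floor bg (Very Dark Grey)
--     'G': (60, 60, 60, 255),  # Metal Grey
--     'D': (40, 40, 40, 255),  # Darker Metal
--     'K': (10, 10, 10, 255),  # Black/Outline
--     'Y': (255, 200, 0, 255), # Industrial Yellow
--     'N': (57, 255, 20, 255), # Neon Green
--     'W': (220, 220, 220, 255)# White/Highlight
-- }
--
-- def parse_sprite(ascii_art, scale=4):
--     lines = [l.replace(' ', '') for l in ascii_art.strip().split('\n') if l]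
--     w = len(lines[0])
--     magenta = (255, 0, 255, 255)
--     pixels = []
--     for line in lines:
--         row = []
--         for ch in line[:w]:
--             row.extend([PALETTE.get(ch, magenta)] * scale)
--         pixels.extend(row * scale)
--     return w * scale, len(lines) * scale, pixels
-- ===== Notes on version B (the rewrite author's own statement) =====
-- stated objective: simpler
-- what changed: B drops the floor-division output-coordinate mapping: it walks the source grid once, repeating each pixel `scale` times within a row and each row `scale` times, instead of recomputing x//scale, y//scale and re-indexing the grid for every output pixel.
import Mathlib
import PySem

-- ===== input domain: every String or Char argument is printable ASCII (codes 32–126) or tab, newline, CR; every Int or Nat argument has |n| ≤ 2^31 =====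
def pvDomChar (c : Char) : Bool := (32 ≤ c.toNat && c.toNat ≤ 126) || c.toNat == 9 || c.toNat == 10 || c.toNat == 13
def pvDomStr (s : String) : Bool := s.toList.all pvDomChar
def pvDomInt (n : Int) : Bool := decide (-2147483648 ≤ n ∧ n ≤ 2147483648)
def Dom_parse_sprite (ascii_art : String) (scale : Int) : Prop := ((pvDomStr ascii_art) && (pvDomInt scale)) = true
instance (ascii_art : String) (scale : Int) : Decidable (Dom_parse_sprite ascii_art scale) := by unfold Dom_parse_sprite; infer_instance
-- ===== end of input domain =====

-- B expands the source grid line by line, repeating each pixel and each row `scale` times,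
-- instead of computing a floor-division source coordinate for every output pixel (objective: simpler).

-- ===== PORT A =====

-- PALETTE (module constant dict)
def pvPalette : PySem.Dict Char (Int × Int × Int × Int) :=
  PySem.Dict.ofList
    [(' ', (0, 0, 0, 0)), ('.', (30, 30, 30, 255)), ('G', (60, 60, 60, 255)),
     ('D', (40, 40, 40, 255)), ('K', (10, 10, 10, 255)), ('Y', (255, 200, 0, 255)),
     ('N', (57, 255, 20, 255)), ('W', (220, 220, 220, 255))]

-- lines = [l.replace(' ', '') for l in ascii_art.strip().split('\n') if l]
-- (this line is identical in A and B, so both ports share it)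
def pvLines (ascii_art : String) : List (List Char) :=
  ((PySem.Chars.splitOn (PySem.Chars.strip ascii_art.toList) ['\n']).filter
      (fun l => !l.isEmpty)).map (fun l => PySem.Chars.replace l [' '] [])

def parse_sprite (ascii_art : String) (scale : Int) : Int × Int × (List (Int × Int × Int × Int)) :=
  let lines := pvLines ascii_art
  let h : Int := lines.length
  -- lines[0] raises IndexError for lines = []; excluded by Pre_, default is irrelevant there
  let w : Int := ((PySem.List.pyGetD lines 0 []).length : Int)
  let grid : List (List (Int × Int × Int × Int)) :=
    lines.map (fun line => line.map (fun c => PySem.Dict.getD pvPalette c (255, 0, 255, 255)))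
  let scaled_pixels : List (Int × Int × Int × Int) :=
    (PySem.List.pyRange 0 (h * scale)).foldl (fun acc y =>
      (PySem.List.pyRange 0 (w * scale)).foldl (fun acc x =>
        -- grid[orig_y][orig_x]; out-of-range row access raises in Python, excluded by Pre_
        acc ++ [PySem.List.pyGetD
                  (PySem.List.pyGetD grid (PySem.Int.floordiv y scale) [])
                  (PySem.Int.floordiv x scale) (255, 0, 255, 255)]) acc) []
  (w * scale, h * scale, scaled_pixels)

-- ===== PORT B =====
def parse_sprite_alt (ascii_art : String) (scale : Int) : Int × Int × (List (Int × Int × Int × Int)) :=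
  let lines := pvLines ascii_art
  let w : Int := ((PySem.List.pyGetD lines 0 []).length : Int)
  -- [px] * scale and row * scale: Python list repetition, empty for scale ≤ 0, hence .toNat
  let pixels : List (Int × Int × Int × Int) :=
    lines.foldl (fun acc line =>
      let row : List (Int × Int × Int × Int) :=
        (PySem.List.slice line none (some w)).foldl
          (fun r c => r ++ List.replicate scale.toNat (PySem.Dict.getD pvPalette c (255, 0, 255, 255))) []
      acc ++ (List.replicate scale.toNat row).flatten) []
  (w * scale, (lines.length : Int) * scale, pixels)

-- ===== PRECONDITION & SPEC =====
-- Pre_ excludes exactly the inputs where the Python A raises IndexError: art with no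
-- non-empty line (lines[0] fails), and, for scale > 0, art whose later lines are shorter
-- (after space removal) than the first (grid[orig_y][orig_x] fails). On every such input
-- A raises; on no input inside Pre_ is A's value thrown away.
def Pre_parse_sprite (ascii_art : String) (scale : Int) : Prop :=
  pvLines ascii_art ≠ [] ∧
    (scale ≤ 0 ∨ ∀ l ∈ pvLines ascii_art,
      (PySem.List.pyGetD (pvLines ascii_art) 0 []).length ≤ l.length)
instance (ascii_art : String) (scale : Int) : Decidable (Pre_parse_sprite ascii_art scale) := by
  unfold Pre_parse_sprite; infer_instance

def pvWitness_parse_sprite : String × Int := ("NK\nKN", 2)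

def Spec_parse_sprite (ascii_art : String) (scale : Int) (out : Int × Int × (List (Int × Int × Int × Int))) : Prop := out = parse_sprite_alt ascii_art scale
instance (ascii_art : String) (scale : Int) (out : Int × Int × (List (Int × Int × Int × Int))) : Decidable (Spec_parse_sprite ascii_art scale out) := by unfold Spec_parse_sprite; infer_instance

-- ===== CLAIM (what is proved, stated in full; the proofs are below) =====
def Claim_equal_parse_sprite : Prop := ∀ (ascii_art : String) (scale : Int), Dom_parse_sprite ascii_art scale → Pre_parse_sprite ascii_art scale → Spec_parse_sprite ascii_art scale (parse_sprite ascii_art scale)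


-- ===== LEMMAS AND PROOFS =====

-- flatten commutes with flatMap (no library lemma found by exact?/simp?)
theorem pv_flatten_flatMap {α β : Type} (l : List α) (f : α → List (List β)) :
    (l.flatMap f).flatten = l.flatMap (fun x => (f x).flatten) := by
  induction l with
  | nil => simp
  | cons a t ih => simp [List.flatMap_cons, List.flatten_append, ih]

-- reading index i/s over range (n*s) is each value repeated s times
theorem pv_map_range_div {α : Type} (s : Nat) (hs : 0 < s) (f : Nat → α) (n : Nat) :
    (List.range (n * s)).map (fun i => f (i / s)) =
      (List.range n).flatMap (fun i => List.replicate s (f i)) := by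
  induction n with
  | zero => simp
  | succ n ih =>
    have h1 : (n + 1) * s = n * s + s := by ring
    rw [h1, List.range_add, List.map_append, ih, List.range_succ, List.flatMap_append]
    congr 1
    rw [List.map_map]
    have hc : ∀ x ∈ List.range s, ((fun i => f (i / s)) ∘ fun x => n * s + x) x = f n := by
      intro x hx
      have hx' : x < s := List.mem_range.mp hx
      have hdiv : (n * s + x) / s = n := by
        rw [Nat.add_comm, Nat.add_mul_div_right _ _ hs, Nat.div_eq_of_lt hx', Nat.zero_add]
      simp only [Function.comp_apply, hdiv]
    rw [List.map_congr_left hc, List.map_const']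
    simp

theorem pv_flatMap_range_div {α : Type} (s : Nat) (hs : 0 < s) (F : Nat → List α) (n : Nat) :
    (List.range (n * s)).flatMap (fun i => F (i / s)) =
      (List.range n).flatMap (fun i => (List.replicate s (F i)).flatten) := by
  rw [List.flatMap_def, pv_map_range_div s hs F n, pv_flatten_flatMap]

theorem pv_take_eq_map_range {α : Type} (l : List α) (d : α) (w : Nat) (h : w ≤ l.length) :
    l.take w = (List.range w).map (fun j => l.getD j d) := by
  apply List.ext_getElem
  · simp [Nat.min_eq_left h]
  · intro i h1 h2
    have hi : i < w := by simpa using h2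
    have hil : i < l.length := lt_of_lt_of_le hi h
    simp [List.getElem_take, List.getD, List.getElem?_eq_getElem hil]

theorem pv_flatMap_eq_range {α β : Type} (l : List α) (d : α) (F : α → List β) :
    l.flatMap F = (List.range l.length).flatMap (fun i => F (l.getD i d)) := by
  conv_lhs => rw [← List.take_length (l := l),
    pv_take_eq_map_range l d l.length le_rfl]
  rw [List.flatMap_map]

theorem pv_main (L : List (List Char)) (n : Nat) (hn : 0 < n)
    (pal : Char → Int × Int × Int × Int) (junk : Int × Int × Int × Int)
    (hw : ∀ l ∈ L, (PySem.List.pyGetD L 0 []).length ≤ l.length) :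
    (List.range (L.length * n)).flatMap (fun y =>
      (List.range ((PySem.List.pyGetD L 0 []).length * n)).map (fun x =>
        ((L.map (fun line => line.map pal)).getD (y / n) []).getD (x / n) junk)) =
    L.flatMap (fun line =>
      (List.replicate n ((line.take (PySem.List.pyGetD L 0 []).length).flatMap
        (fun c => List.replicate n (pal c)))).flatten) := by
  set w := (PySem.List.pyGetD L 0 []).length with hwdef
  rw [pv_flatMap_range_div n hn (fun k =>
        (List.range (w * n)).map (fun x =>
          ((L.map (fun line => line.map pal)).getD k []).getD (x / n) junk)) L.length,
      pv_flatMap_eq_range L [] (fun line =>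
        (List.replicate n ((line.take w).flatMap (fun c => List.replicate n (pal c)))).flatten)]
  apply List.flatMap_congr
  intro y hy
  have hyL : y < L.length := List.mem_range.mp hy
  congr 2
  -- grid row y = (L[y]).map pal
  have hrow : (L.map (fun line => line.map pal)).getD y [] = (L.getD y []).map pal := by
    rw [List.getD_eq_getElem _ _ (by simpa using hyL), List.getD_eq_getElem _ _ hyL,
        List.getElem_map]
  rw [hrow]
  -- inner row equality
  have hlen : w ≤ (L.getD y []).length := hw _ (by
    rw [List.getD_eq_getElem _ _ hyL]; exact List.getElem_mem hyL)
  rw [pv_map_range_div n hn (fun k => ((L.getD y []).map pal).getD k junk) w,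
      pv_take_eq_map_range (L.getD y []) ' ' w hlen,
      List.flatMap_map]
  apply List.flatMap_congr
  intro j hj
  have hjw : j < w := List.mem_range.mp hj
  have hjl : j < (L.getD y []).length := lt_of_lt_of_le hjw hlen
  congr 1
  rw [List.getD_eq_getElem _ _ (by simpa using hjl), List.getD_eq_getElem _ _ hjl,
      List.getElem_map]

-- ===== VERDICT (by name: the statement is the Claim_ definition above) =====
theorem parse_sprite_spec : Claim_equal_parse_sprite := by
  intro ascii_art scale _ hpre
  unfold Spec_parse_sprite parse_sprite parse_sprite_alt
  obtain ⟨hne, hpre2⟩ := hpre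
  simp only [PySem.List.foldl_append_singleton_eq_map, PySem.List.foldl_append_eq_flatMap,
    List.nil_append, Prod.mk.injEq, true_and]
  by_cases hs : scale ≤ 0
  · have h1 : ((pvLines ascii_art).length : Int) * scale ≤ 0 :=
      mul_nonpos_of_nonneg_of_nonpos (by positivity) hs
    have h2 : scale.toNat = 0 := by omega
    simp [PySem.List.pyRange_one_eq_nil h1, h2]
  · rw [not_le] at hs
    obtain ⟨n, rfl⟩ : ∃ n : Nat, scale = (n : Int) := ⟨scale.toNat, by omega⟩
    have hn : 0 < n := by exact_mod_cast hs
    have hw : ∀ l ∈ pvLines ascii_art,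
        (PySem.List.pyGetD (pvLines ascii_art) 0 []).length ≤ l.length := by
      rcases hpre2 with h | h
      · exact absurd h (by exact_mod_cast not_le.mpr hs)
      · exact h
    have hmain := pv_main (pvLines ascii_art) n hn
      (fun c => PySem.Dict.getD pvPalette c (255, 0, 255, 255)) (255, 0, 255, 255) hw
    simp only [← Nat.cast_mul, PySem.List.pyRange_zero_natCast, List.flatMap_map,
      List.map_map, Function.comp_def, PySem.Int.floordiv_natCast, PySem.List.pyGetD_natCast,
      Int.toNat_natCast, PySem.List.slice_to _ (by positivity : (0:Int) ≤ ((PySem.List.pyGetD (pvLines ascii_art) 0 []).length : Int))] at *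
    exact hmain
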